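-- pv_equiv track=rewrite | github.com/roro1230/VRPTW-GA | vrptw-ga.py | transportation_cost
-- ===== SOURCE A (Python) =====
-- def transportation_cost(individual, time_windows, time_vehicle, transportation_time):
--     te = 0
--     tl = 0
--     for i in range(0, len(individual)):
--         path_vehicle = individual[i]
--         pick_up_time = time_vehicle[i]
--         for j in range(1, len(path_vehicle) - 1):
--             pick_up_time = pick_up_time + transportation_time[path_vehicle[j - 1]][path_vehicle[j]]
--             if pick_up_time < time_windows[path_vehicle[j]][0]: te = te + time_windows[path_vehicle[j]][0] - pick_up_time
--             if pick_up_time > time_windows[path_vehicle[j]][1]: tl = tl - time_windows[path_vehicle[j]][1] + pick_up_time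
--     return te, tl
-- ===== SOURCE B (Python) =====
-- def transportation_cost(individual, time_windows, time_vehicle, transportation_time):
--     # Recursive sliding-window walk over each path as a linked list: no index
--     # arithmetic, penalties computed on the way back up the recursion.
--     def walk(prev, rest, t):
--         if len(rest) < 2:
--             return (0, 0)
--         cur = rest[0]
--         t2 = t + transportation_time[prev][cur]
--         lo, hi = time_windows[cur]
--         e, l = walk(cur, rest[1:], t2)
--         return (e + max(0, lo - t2), l + max(0, t2 - hi))
--     te = 0
--     tl = 0
--     for path, start in zip(individual, time_vehicle):
--         if path:
--             e, l = walk(path[0], path[1:], start)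
--             te += e
--             tl += l
--     return te, tl
-- ===== Notes on version B (the rewrite author's own statement) =====
-- stated objective: alternative
-- what changed: A iterates index ranges over each path, threading te/tl/pick_up_time through one fused loop with if-guards; B recursively walks every path as a linked list (prev node + tail), never indexing, and builds each route's (early, late) penalty pair on the way back up the recursion, summing pairs per route.
import Mathlib
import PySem

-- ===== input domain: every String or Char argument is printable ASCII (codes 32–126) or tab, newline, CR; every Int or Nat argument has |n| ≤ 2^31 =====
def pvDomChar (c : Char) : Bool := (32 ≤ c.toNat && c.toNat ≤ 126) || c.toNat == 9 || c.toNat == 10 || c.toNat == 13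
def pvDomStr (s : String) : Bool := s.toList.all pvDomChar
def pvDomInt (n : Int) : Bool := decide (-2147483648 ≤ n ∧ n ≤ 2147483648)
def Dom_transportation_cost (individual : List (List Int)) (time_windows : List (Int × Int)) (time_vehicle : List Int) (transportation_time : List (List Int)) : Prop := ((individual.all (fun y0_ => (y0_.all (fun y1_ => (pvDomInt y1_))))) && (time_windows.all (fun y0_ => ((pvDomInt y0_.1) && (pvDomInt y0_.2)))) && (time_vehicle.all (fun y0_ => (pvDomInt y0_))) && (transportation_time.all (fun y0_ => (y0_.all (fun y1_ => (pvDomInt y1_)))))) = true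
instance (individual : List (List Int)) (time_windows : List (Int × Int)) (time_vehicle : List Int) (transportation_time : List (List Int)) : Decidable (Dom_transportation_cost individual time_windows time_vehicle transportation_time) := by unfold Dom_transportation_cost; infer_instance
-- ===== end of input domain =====

-- B replaces A's index-range loops by a recursive sliding-window walk over each path as a
-- linked list (prev node + tail), building each route's penalty pair on the way back up the
-- recursion (alternative decomposition; same asymptotic cost).


-- ===== PORT A =====
-- body of A's inner loop: updates (te, tl, pick_up_time) at step j, exactly as the Python lines
-- (Pre_ guarantees every index is in range, so the pyGetD defaults are never reached)
def tcStepA (time_windows : List (Int × Int)) (transportation_time : List (List Int))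
    (path_vehicle : List Int) (st : Int × Int × Int) (j : Int) : Int × Int × Int :=
  let t' := st.2.2 + PySem.List.pyGetD
      (PySem.List.pyGetD transportation_time (PySem.List.pyGetD path_vehicle (j - 1) 0) [])
      (PySem.List.pyGetD path_vehicle j 0) 0
  let w := PySem.List.pyGetD time_windows (PySem.List.pyGetD path_vehicle j 0) (0, 0)
  (if t' < w.1 then st.1 + w.1 - t' else st.1,
   if t' > w.2 then st.2.1 - w.2 + t' else st.2.1,
   t')

def transportation_cost (individual : List (List Int)) (time_windows : List (Int × Int)) (time_vehicle : List Int) (transportation_time : List (List Int)) : Int × Int :=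
  (PySem.List.pyRange 0 (individual.length : Int) 1).foldl
    (fun (s : Int × Int) i =>
      let path_vehicle := PySem.List.pyGetD individual i []
      let pick_up_time := PySem.List.pyGetD time_vehicle i 0
      let r := (PySem.List.pyRange 1 ((path_vehicle.length : Int) - 1) 1).foldl
        (tcStepA time_windows transportation_time path_vehicle) (s.1, s.2, pick_up_time)
      (r.1, r.2.1))
    (0, 0)

-- ===== PORT B =====
-- Source B's walk(prev, rest, t): recursive sliding window over the path's tail; stops when fewer
-- than two nodes remain (the final depot node gets no penalty)
def tcWalk (time_windows : List (Int × Int)) (transportation_time : List (List Int)) :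
    Int → List Int → Int → Int × Int
  | _, [], _ => (0, 0)
  | _, [_], _ => (0, 0)
  | prev, cur :: next :: rest, t =>
      let t2 := t + PySem.List.pyGetD
          (PySem.List.pyGetD transportation_time prev []) cur 0
      let w := PySem.List.pyGetD time_windows cur (0, 0)
      let p := tcWalk time_windows transportation_time cur (next :: rest) t2
      (p.1 + max 0 (w.1 - t2), p.2 + max 0 (t2 - w.2))

def transportation_cost_alt (individual : List (List Int)) (time_windows : List (Int × Int)) (time_vehicle : List Int) (transportation_time : List (List Int)) : Int × Int :=
  (individual.zip time_vehicle).foldl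
    (fun (s : Int × Int) pv =>
      match pv.1 with
      | [] => s
      | h :: tail =>
          let p := tcWalk time_windows transportation_time h tail pv.2
          (s.1 + p.1, s.2 + p.2))
    (0, 0)

-- ===== PRECONDITION & SPEC =====
-- exactly the inputs on which Python A returns without an IndexError: every vehicle has a start
-- time, and along every path each hop's node indices are Python-valid (possibly negative) indices
-- into transportation_time, its row, and time_windows
def Pre_transportation_cost (individual : List (List Int)) (time_windows : List (Int × Int)) (time_vehicle : List Int) (transportation_time : List (List Int)) : Prop :=
  individual.length ≤ time_vehicle.length ∧
  ∀ path ∈ individual, ∀ j ∈ PySem.List.pyRange 1 ((path.length : Int) - 1) 1,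
    PySem.Raise.InRange transportation_time.length (PySem.List.pyGetD path (j - 1) 0) ∧
    PySem.Raise.InRange (PySem.List.pyGetD transportation_time (PySem.List.pyGetD path (j - 1) 0) []).length (PySem.List.pyGetD path j 0) ∧
    PySem.Raise.InRange time_windows.length (PySem.List.pyGetD path j 0)
instance (individual : List (List Int)) (time_windows : List (Int × Int)) (time_vehicle : List Int) (transportation_time : List (List Int)) : Decidable (Pre_transportation_cost individual time_windows time_vehicle transportation_time) := by unfold Pre_transportation_cost; infer_instance

def pvWitness_transportation_cost : List (List Int) × (List (Int × Int)) × List Int × List (List Int) :=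
  ([[0, 1, 0]], [(0, 10), (2, 5)], [0], [[0, 3], [2, 0]])

def Spec_transportation_cost (individual : List (List Int)) (time_windows : List (Int × Int)) (time_vehicle : List Int) (transportation_time : List (List Int)) (out : Int × Int) : Prop := out = transportation_cost_alt individual time_windows time_vehicle transportation_time
instance (individual : List (List Int)) (time_windows : List (Int × Int)) (time_vehicle : List Int) (transportation_time : List (List Int)) (out : Int × Int) : Decidable (Spec_transportation_cost individual time_windows time_vehicle transportation_time out) := by unfold Spec_transportation_cost; infer_instance

-- ===== CLAIM (what is proved, stated in full; the proofs are below) =====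
def Claim_equal_transportation_cost : Prop := ∀ (individual : List (List Int)) (time_windows : List (Int × Int)) (time_vehicle : List Int) (transportation_time : List (List Int)), Dom_transportation_cost individual time_windows time_vehicle transportation_time → Pre_transportation_cost individual time_windows time_vehicle transportation_time → Spec_transportation_cost individual time_windows time_vehicle transportation_time (transportation_cost individual time_windows time_vehicle transportation_time)

-- ===== LEMMAS AND PROOFS =====

-- the final pick_up_time of A's inner loop, phrased on B's (prev, rest) decomposition
def tcFinal (transportation_time : List (List Int)) : Int → List Int → Int → Int
  | _, [], t => t
  | _, [_], t => t
  | prev, cur :: next :: rest, t =>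
      tcFinal transportation_time cur (next :: rest)
        (t + PySem.List.pyGetD (PySem.List.pyGetD transportation_time prev []) cur 0)

theorem if_te (te w1 t' : Int) :
    (if t' < w1 then te + w1 - t' else te) = te + max 0 (w1 - t') := by
  split_ifs with h
  · rw [max_eq_right (by omega)]; omega
  · rw [max_eq_left (by omega)]; omega

theorem if_tl (tl w2 t' : Int) :
    (if t' > w2 then tl - w2 + t' else tl) = tl + max 0 (t' - w2) := by
  split_ifs with h
  · rw [max_eq_right (by omega)]; omega
  · rw [max_eq_left (by omega)]; omega

-- dropping the head of the path shifts Python indexing by one (nonnegative indices)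
theorem pyGetD_cons_shift {α : Type} (x : α) (Q : List α) (n : Nat) (d : α) :
    PySem.List.pyGetD (x :: Q) ((n : Int) + 1) d = PySem.List.pyGetD Q (n : Int) d := by
  have h : ((n : Int) + 1) = ((n + 1 : Nat) : Int) := by push_cast; ring
  rw [h, PySem.List.pyGetD_natCast, PySem.List.pyGetD_natCast, List.getD_cons_succ]

-- xs[1] on a two-or-more element list
theorem pyGetD_one_cons {α : Type} (a b : α) (l : List α) (d : α) :
    PySem.List.pyGetD (a :: b :: l) 1 d = b := by
  have h := pyGetD_cons_shift a (b :: l) 0 d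
  norm_num at h
  exact h

-- A's step on path prev :: Q at index j+1 is A's step on Q at index j (j ≥ 1)
theorem tcStepA_shift (tw : List (Int × Int)) (tt : List (List Int)) (prev : Int)
    (Q : List Int) (st : Int × Int × Int) (n : Nat) :
    tcStepA tw tt (prev :: Q) st ((n : Int) + 2) = tcStepA tw tt Q st ((n : Int) + 1) := by
  unfold tcStepA
  have h1 : ((n : Int) + 2 - 1) = ((n : Int) + 1) := by ring
  have h2 : ((n : Int) + 2) = (((n + 1 : Nat) : Int) + 1) := by push_cast; ring
  rw [h1, h2, pyGetD_cons_shift, pyGetD_cons_shift]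
  push_cast
  ring_nf

-- per-vehicle equivalence: A's fused index loop over path prev :: rest equals B's recursive walk
theorem inner_eq (tw : List (Int × Int)) (tt : List (List Int)) :
    ∀ (rest : List Int) (prev te tl t : Int),
    (PySem.List.pyRange 1 ((rest.length : Nat) : Int) 1).foldl
        (tcStepA tw tt (prev :: rest)) (te, tl, t) =
      (te + (tcWalk tw tt prev rest t).1, tl + (tcWalk tw tt prev rest t).2,
       tcFinal tt prev rest t) := by
  intro rest
  induction rest with
  | nil => intro prev te tl t; simp [PySem.List.pyRange_one_eq_nil, tcWalk, tcFinal]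
  | cons cur rs ih =>
    intro prev te tl t
    cases rs with
    | nil =>
      simp [PySem.List.pyRange_one_eq_nil, tcWalk, tcFinal]
    | cons next rs' =>
      rw [PySem.List.pyRange_one_cons (by simp only [List.length_cons]; push_cast; omega),
          List.foldl_cons, show (1 : Int) + 1 = 2 by ring]
      have hstep1 : tcStepA tw tt (prev :: cur :: next :: rs') (te, tl, t) 1 =
          (te + max 0 ((PySem.List.pyGetD tw cur (0, 0)).1 -
              (t + PySem.List.pyGetD (PySem.List.pyGetD tt prev []) cur 0)),
           tl + max 0 ((t + PySem.List.pyGetD (PySem.List.pyGetD tt prev []) cur 0) -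
              (PySem.List.pyGetD tw cur (0, 0)).2),
           t + PySem.List.pyGetD (PySem.List.pyGetD tt prev []) cur 0) := by
        unfold tcStepA
        norm_num [pyGetD_one_cons, PySem.List.pyGetD_zero_cons, if_te, if_tl]
      rw [hstep1]
      -- shift the remaining indices 2..len-1 down by one onto the tail path
      have hshift : (PySem.List.pyRange 2 (((cur :: next :: rs').length : Nat) : Int) 1).foldl
            (tcStepA tw tt (prev :: cur :: next :: rs'))
            (te + max 0 ((PySem.List.pyGetD tw cur (0, 0)).1 -
                (t + PySem.List.pyGetD (PySem.List.pyGetD tt prev []) cur 0)),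
             tl + max 0 ((t + PySem.List.pyGetD (PySem.List.pyGetD tt prev []) cur 0) -
                (PySem.List.pyGetD tw cur (0, 0)).2),
             t + PySem.List.pyGetD (PySem.List.pyGetD tt prev []) cur 0) =
          (PySem.List.pyRange 1 (((next :: rs').length : Nat) : Int) 1).foldl
            (tcStepA tw tt (cur :: next :: rs'))
            (te + max 0 ((PySem.List.pyGetD tw cur (0, 0)).1 -
                (t + PySem.List.pyGetD (PySem.List.pyGetD tt prev []) cur 0)),
             tl + max 0 ((t + PySem.List.pyGetD (PySem.List.pyGetD tt prev []) cur 0) -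
                (PySem.List.pyGetD tw cur (0, 0)).2),
             t + PySem.List.pyGetD (PySem.List.pyGetD tt prev []) cur 0) := by
        rw [PySem.List.pyRange_one 2, PySem.List.pyRange_one 1, List.foldl_map, List.foldl_map]
        have hlen : ((((cur :: next :: rs').length : Nat) : Int) - 2).toNat =
            ((((next :: rs').length : Nat) : Int) - 1).toNat := by
          simp only [List.length_cons]; omega
        rw [hlen]
        apply PySem.List.foldl_congr_mem
        intro s k _
        rw [show ((2 : Int) + (k : Int)) = ((k : Int) + 2) by ring,
            show ((1 : Int) + (k : Int)) = ((k : Int) + 1) by ring]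
        exact tcStepA_shift tw tt prev (cur :: next :: rs') s k
      rw [hshift, ih cur]
      show _ = (te + (tcWalk tw tt prev (cur :: next :: rs') t).1,
                tl + (tcWalk tw tt prev (cur :: next :: rs') t).2,
                tcFinal tt prev (cur :: next :: rs') t)
      rw [show tcWalk tw tt prev (cur :: next :: rs') t =
          (let t2 := t + PySem.List.pyGetD (PySem.List.pyGetD tt prev []) cur 0
           let w := PySem.List.pyGetD tw cur (0, 0)
           let p := tcWalk tw tt cur (next :: rs') t2
           (p.1 + max 0 (w.1 - t2), p.2 + max 0 (t2 - w.2))) from rfl]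
      rw [show tcFinal tt prev (cur :: next :: rs') t =
          tcFinal tt cur (next :: rs')
            (t + PySem.List.pyGetD (PySem.List.pyGetD tt prev []) cur 0) from rfl]
      refine Prod.ext (by ring_nf) (Prod.ext (by ring_nf) rfl)

-- index loop over two parallel lists = fold over their zip (needs xs no longer than ys)
theorem foldl_range_zip {α β σ : Type} (G : α → β → σ → σ) (dx : α) (dy : β) :
    ∀ (xs : List α) (ys : List β) (s : σ), xs.length ≤ ys.length →
    (List.range xs.length).foldl (fun s k => G (xs.getD k dx) (ys.getD k dy) s) s =
      (xs.zip ys).foldl (fun s p => G p.1 p.2 s) s := by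
  intro xs
  induction xs with
  | nil => intro ys s _; simp
  | cons x xs ih =>
    intro ys s hlen
    cases ys with
    | nil => simp at hlen
    | cons y ys =>
      rw [List.length_cons, List.range_succ_eq_map, List.foldl_cons, List.foldl_map]
      simp only [List.getD_cons_zero, List.getD_cons_succ, List.zip_cons_cons, List.foldl_cons]
      exact ih ys (G x y s) (by simpa using hlen)

-- ===== VERDICT (by name: the statement is the Claim_ definition above) =====
theorem transportation_cost_spec : Claim_equal_transportation_cost := by
  intro individual time_windows time_vehicle transportation_time _ hpre
  unfold Spec_transportation_cost transportation_cost transportation_cost_alt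
  rw [show ((individual.length : Int)) = ((individual.length : Nat) : Int) from rfl,
      PySem.List.pyRange_zero_nat, List.foldl_map]
  simp only [PySem.List.pyGetD_natCast]
  rw [foldl_range_zip
      (fun path pick (s : Int × Int) =>
        (let r := (PySem.List.pyRange 1 ((path.length : Int) - 1) 1).foldl
            (tcStepA time_windows transportation_time path) (s.1, s.2, pick)
         (r.1, r.2.1)))
      ([] : List Int) (0 : Int) individual time_vehicle (0, 0) hpre.1]
  apply PySem.List.foldl_congr_mem
  intro s pv _
  show (let r := (PySem.List.pyRange 1 ((pv.1.length : Int) - 1) 1).foldl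
          (tcStepA time_windows transportation_time pv.1) (s.1, s.2, pv.2)
        ((r.1, r.2.1) : Int × Int)) = _
  match hp : pv.1 with
  | [] =>
      simp [PySem.List.pyRange_one_eq_nil]
  | h :: tail =>
      rw [show (((h :: tail).length : Int) - 1) = ((tail.length : Nat) : Int) by simp only [List.length_cons]; push_cast; ring]
      rw [inner_eq time_windows transportation_time tail h s.1 s.2 pv.2]
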